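-- pv_equiv track=rewrite | github.com/Skyscimitar/RIW | cacm_part1/BinarySearchMethods.py | resolve_not
-- ===== SOURCE A (Python) =====
-- def resolve_not(l, doc_ids):
--     output = []
--     while len(l) > 0 and len(doc_ids) > 0:
--         if l[0] == doc_ids[0]:
--             l = l[1:]
--             doc_ids = doc_ids[1:]
--         else:
--             output.append(doc_ids[0])
--             doc_ids = doc_ids[1:]
--     if len(doc_ids) > 0:
--         output += doc_ids
--     return output
-- ===== SOURCE B (Python) =====
-- def resolve_not(l, doc_ids):
--     # Single pass over doc_ids with an index pointer into l; no list slicing.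
--     out = []
--     i = 0
--     n = len(l)
--     for d in doc_ids:
--         if i < n and l[i] == d:
--             i += 1
--         else:
--             out.append(d)
--     return out
-- ===== Notes on version B (the rewrite author's own statement) =====
-- stated objective: faster
-- what changed: Replaced the slicing while-loop (each step copies both lists) by a single pass over doc_ids with an integer index pointer into l, appending non-matching elements as it goes.
import Mathlib
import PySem

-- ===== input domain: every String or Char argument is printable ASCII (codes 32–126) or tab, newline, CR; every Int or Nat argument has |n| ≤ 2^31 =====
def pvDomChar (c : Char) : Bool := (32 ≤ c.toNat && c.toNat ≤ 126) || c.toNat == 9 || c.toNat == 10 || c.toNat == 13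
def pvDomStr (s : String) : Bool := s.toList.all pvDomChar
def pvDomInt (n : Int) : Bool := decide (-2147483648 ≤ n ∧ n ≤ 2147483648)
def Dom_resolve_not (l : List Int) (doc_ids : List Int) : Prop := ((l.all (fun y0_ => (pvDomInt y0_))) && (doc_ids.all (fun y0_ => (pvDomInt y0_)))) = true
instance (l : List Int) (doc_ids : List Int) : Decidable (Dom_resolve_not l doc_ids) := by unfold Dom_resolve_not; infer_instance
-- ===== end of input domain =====

-- B replaces A's slicing while-loop by a single index-pointer pass over doc_ids (return value only).


-- ===== PORT A =====
-- the while loop: every iteration drops the head of doc_ids (and of l in the equal case);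
-- after the loop the remaining doc_ids are appended to the accumulated output.
def resolveNotGoA (l : List Int) (doc_ids : List Int) (acc : List Int) : List Int :=
  match l, doc_ids with
  | x :: ls, d :: ds =>
      if x = d then resolveNotGoA ls ds acc
      else resolveNotGoA (x :: ls) ds (acc ++ [d])
  | _, ds => if ds.length > 0 then acc ++ ds else acc

def resolve_not (l : List Int) (doc_ids : List Int) : List Int :=
  resolveNotGoA l doc_ids []

-- ===== PORT B =====
-- single fold over doc_ids with state (index pointer into l, output so far)
def resolve_not_alt (l : List Int) (doc_ids : List Int) : List Int :=
  (doc_ids.foldl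
    (fun (s : Nat × List Int) d =>
      if s.1 < l.length && l.getD s.1 0 == d then (s.1 + 1, s.2) else (s.1, s.2 ++ [d]))
    (0, [])).2

-- ===== PRECONDITION & SPEC =====
def Spec_resolve_not (l : List Int) (doc_ids : List Int) (out : List Int) : Prop := out = resolve_not_alt l doc_ids
instance (l : List Int) (doc_ids : List Int) (out : List Int) : Decidable (Spec_resolve_not l doc_ids out) := by unfold Spec_resolve_not; infer_instance

-- ===== CLAIM (what is proved, stated in full; the proofs are below) =====
def Claim_equal_resolve_not : Prop := ∀ (l : List Int) (doc_ids : List Int), Dom_resolve_not l doc_ids → Spec_resolve_not l doc_ids (resolve_not l doc_ids)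

-- ===== LEMMAS AND PROOFS =====

theorem goA_nil (ds acc : List Int) : resolveNotGoA [] ds acc = acc ++ ds := by
  cases ds <;> simp [resolveNotGoA]

theorem foldB_goA (l : List Int) :
    ∀ (ds : List Int) (i : Nat) (acc : List Int),
      (ds.foldl
        (fun (s : Nat × List Int) d =>
          if s.1 < l.length && l.getD s.1 0 == d then (s.1 + 1, s.2) else (s.1, s.2 ++ [d]))
        (i, acc)).2 = resolveNotGoA (l.drop i) ds acc := by
  intro ds
  induction ds with
  | nil =>
    intro i acc
    cases h : l.drop i <;> simp [resolveNotGoA]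
  | cons d ds ih =>
    intro i acc
    cases h : l.drop i with
    | nil =>
      have hlen : l.length - i = 0 := by rw [← List.length_drop, h]; rfl
      have hc : ¬ ((decide (i < l.length) && (l.getD i 0 == d)) = true) := by
        have : ¬ i < l.length := by omega
        simp [this]
      rw [List.foldl_cons, if_neg hc, ih, h, goA_nil, goA_nil]
      simp
    | cons x ls =>
      have hlen : l.length - i = ls.length + 1 := by
        rw [← List.length_drop, h]; simp
      have hlt : i < l.length := by omega
      have hidx : l[i]? = some x := by rw [← List.head?_drop, h]; rfl
      have hgi : l[i] = x := by
        have h2 : l[i]? = some (l[i]) := List.getElem?_eq_getElem hlt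
        rw [hidx] at h2
        exact (Option.some_inj.mp h2).symm
      have h1 : List.drop 1 (List.drop i l) = List.drop (i + 1) l := List.drop_drop
      have hdrop1 : l.drop (i + 1) = ls := by rw [← h1, h]; rfl
      by_cases hxd : x = d
      · have hc : (decide (i < l.length) && (l.getD i 0 == d)) = true := by
          simp [hlt, hgi, hxd]
        rw [List.foldl_cons, if_pos hc, ih, hdrop1]
        simp [resolveNotGoA, hxd]
      · have hc : ¬ ((decide (i < l.length) && (l.getD i 0 == d)) = true) := by
          simp [hlt, hgi, hxd]
        rw [List.foldl_cons, if_neg hc, ih, h]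
        simp [resolveNotGoA, hxd]

-- ===== VERDICT (by name: the statement is the Claim_ definition above) =====
theorem resolve_not_spec : Claim_equal_resolve_not := by
  intro l doc_ids _
  unfold Spec_resolve_not resolve_not resolve_not_alt
  rw [foldB_goA l doc_ids 0 []]
  simp
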